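-- pv_equiv track=rewrite | github.com/agruber/insect-pol-iii | scripts/align_promoters_v2.py | mark_promoter_regions
-- ===== SOURCE A (Python) =====
-- from typing import List, Dict, Set, Tuple, Optional
--
-- def mark_promoter_regions(aligned_seq: str, anchor_data: Optional[Tuple[int, str]],
--                           promoter_shift: int, promoter_length: int, alignment_offset: int) -> str:
--     """
--     Mark promoter regions with uppercase, rest with lowercase.
--
--     Args:
--         aligned_seq: Aligned sequence with gaps
--         anchor_data: (position, kmer) tuple or None
--         promoter_shift: Nucleotides upstream of anchor where promoter starts
--         promoter_length: Length of promoter region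
--         alignment_offset: Offset to convert original position to alignment position
--
--     Returns:
--         Sequence with promoter in uppercase, rest in lowercase
--     """
--     if anchor_data is None or '-' * len(aligned_seq) == aligned_seq:
--         # No anchor or all gaps - return all lowercase
--         return aligned_seq.lower()
--
--     pos, kmer = anchor_data
--
--     # Calculate promoter start position in alignment
--     # pos is the position in original sequence
--     # alignment_offset tells us how many gaps were added to the left
--     anchor_pos_in_alignment = pos + alignment_offset
--     promoter_start_in_alignment = anchor_pos_in_alignment - promoter_shift
--     promoter_end_in_alignment = promoter_start_in_alignment + promoter_length
--
--     # Ensure bounds are valid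
--     promoter_start_in_alignment = max(0, promoter_start_in_alignment)
--     promoter_end_in_alignment = min(len(aligned_seq), promoter_end_in_alignment)
--
--     # Build marked sequence
--     marked = []
--     for i, char in enumerate(aligned_seq):
--         if char == '-':
--             marked.append('-')
--         elif promoter_start_in_alignment <= i < promoter_end_in_alignment:
--             marked.append(char.upper())
--         else:
--             marked.append(char.lower())
--
--     return ''.join(marked)
-- ===== SOURCE B (Python) =====
-- def mark_promoter_regions(aligned_seq: str, anchor_data, promoter_shift: int,
--                           promoter_length: int, alignment_offset: int) -> str:
--     # Bulk slice transform instead of a per-character loop; gaps ('-') are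
--     # case-invariant, so slicing + upper/lower preserves them and the
--     # all-gaps guard of the original becomes unnecessary.
--     if anchor_data is None:
--         return aligned_seq.lower()
--     pos, _kmer = anchor_data
--     n = len(aligned_seq)
--     s0 = pos + alignment_offset - promoter_shift
--     start = min(n, max(0, s0))
--     end = max(start, min(n, s0 + promoter_length))
--     return (aligned_seq[:start].lower()
--             + aligned_seq[start:end].upper()
--             + aligned_seq[end:].lower())
-- ===== Notes on version B (the rewrite author's own statement) =====
-- stated objective: simpler
-- what changed: Replaces the per-character enumerate loop (and the all-gaps guard) with three bulk slice lower/upper operations, relying on '-' being case-invariant.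
import Mathlib
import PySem

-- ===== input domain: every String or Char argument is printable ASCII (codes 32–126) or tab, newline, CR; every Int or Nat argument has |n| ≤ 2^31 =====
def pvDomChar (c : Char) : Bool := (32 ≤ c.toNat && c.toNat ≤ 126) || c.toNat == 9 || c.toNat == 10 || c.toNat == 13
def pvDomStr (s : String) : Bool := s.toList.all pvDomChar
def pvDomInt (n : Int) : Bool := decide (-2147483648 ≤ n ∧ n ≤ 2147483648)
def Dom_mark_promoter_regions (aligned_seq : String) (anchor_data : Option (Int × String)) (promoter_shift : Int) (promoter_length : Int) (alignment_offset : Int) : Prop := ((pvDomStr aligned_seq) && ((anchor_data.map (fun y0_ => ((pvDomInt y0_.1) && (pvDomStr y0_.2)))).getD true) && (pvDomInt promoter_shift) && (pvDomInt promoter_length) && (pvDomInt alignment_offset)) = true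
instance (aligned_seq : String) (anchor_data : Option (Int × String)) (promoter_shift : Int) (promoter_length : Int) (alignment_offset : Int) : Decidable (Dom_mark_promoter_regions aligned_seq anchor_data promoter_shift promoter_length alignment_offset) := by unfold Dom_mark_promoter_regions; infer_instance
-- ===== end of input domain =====

-- B replaces A's per-character loop (and its all-gaps guard) by three bulk slice
-- lower/upper operations; '-' is case-invariant so gaps are preserved. Objective: simpler.

-- ===== PORT A =====
def mark_promoter_regions (aligned_seq : String) (anchor_data : Option (Int × String)) (promoter_shift : Int) (promoter_length : Int) (alignment_offset : Int) : String :=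
  match anchor_data with
  | none => PySem.Str.lower aligned_seq
  | some (pos, _kmer) =>
    if List.replicate aligned_seq.toList.length '-' = aligned_seq.toList then
      PySem.Str.lower aligned_seq
    else
      let anchor_pos_in_alignment := pos + alignment_offset
      let promoter_start0 := anchor_pos_in_alignment - promoter_shift
      let promoter_end0 := promoter_start0 + promoter_length
      let promoter_start := max 0 promoter_start0
      let promoter_end := min (aligned_seq.toList.length : Int) promoter_end0
      let marked := (PySem.List.enumerate aligned_seq.toList 0).map (fun ic =>
        if ic.2 = '-' then '-'
        else if promoter_start ≤ ic.1 ∧ ic.1 < promoter_end then PySem.Chars.upperChar ic.2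
        else PySem.Chars.lowerChar ic.2)
      String.ofList marked

-- ===== PORT B =====
-- B's slices aligned_seq[:start], [start:end], [end:] have clamped Nat bounds
-- 0 ≤ start ≤ end ≤ len, so they are exactly take/drop (PySem.List.slice_natCast).
def mark_promoter_regions_alt (aligned_seq : String) (anchor_data : Option (Int × String)) (promoter_shift : Int) (promoter_length : Int) (alignment_offset : Int) : String :=
  match anchor_data with
  | none => PySem.Str.lower aligned_seq
  | some (pos, _kmer) =>
    let cs := aligned_seq.toList
    let n : Int := cs.length
    let s0 := pos + alignment_offset - promoter_shift
    let start : Nat := (min n (max 0 s0)).toNat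
    let stop : Nat := max start (min n (s0 + promoter_length)).toNat
    String.ofList (PySem.Chars.lower (cs.take start)
      ++ PySem.Chars.upper ((cs.drop start).take (stop - start))
      ++ PySem.Chars.lower (cs.drop stop))

-- ===== PRECONDITION & SPEC =====
def Spec_mark_promoter_regions (aligned_seq : String) (anchor_data : Option (Int × String)) (promoter_shift : Int) (promoter_length : Int) (alignment_offset : Int) (out : String) : Prop := out = mark_promoter_regions_alt aligned_seq anchor_data promoter_shift promoter_length alignment_offset
instance (aligned_seq : String) (anchor_data : Option (Int × String)) (promoter_shift : Int) (promoter_length : Int) (alignment_offset : Int) (out : String) : Decidable (Spec_mark_promoter_regions aligned_seq anchor_data promoter_shift promoter_length alignment_offset out) := by unfold Spec_mark_promoter_regions; infer_instance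

-- ===== CLAIM (what is proved, stated in full; the proofs are below) =====
def Claim_equal_mark_promoter_regions : Prop := ∀ (aligned_seq : String) (anchor_data : Option (Int × String)) (promoter_shift : Int) (promoter_length : Int) (alignment_offset : Int), Dom_mark_promoter_regions aligned_seq anchor_data promoter_shift promoter_length alignment_offset → Spec_mark_promoter_regions aligned_seq anchor_data promoter_shift promoter_length alignment_offset (mark_promoter_regions aligned_seq anchor_data promoter_shift promoter_length alignment_offset)

-- ===== LEMMAS AND PROOFS =====

-- A's per-character body, as a function of (index, char)
def pvMarkChar (ps pe : Int) (ic : Int × Char) : Char :=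
  if ic.2 = '-' then '-'
  else if ps ≤ ic.1 ∧ ic.1 < pe then PySem.Chars.upperChar ic.2
  else PySem.Chars.lowerChar ic.2

lemma pvSegLower (ps pe : Int) (xs : List Char) (s : Int)
    (h : ∀ k : Int, s ≤ k → k < s + xs.length → ¬(ps ≤ k ∧ k < pe)) :
    (PySem.List.enumerate xs s).map (pvMarkChar ps pe) = PySem.Chars.lower xs := by
  induction xs generalizing s with
  | nil => simp [PySem.List.enumerate_nil, PySem.Chars.lower]
  | cons x xs ih =>
    rw [PySem.List.enumerate_cons, List.map_cons]
    have h0 : ¬(ps ≤ s ∧ s < pe) := h s le_rfl (by push_cast [List.length_cons]; omega)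
    have hx : pvMarkChar ps pe (s, x) = PySem.Chars.lowerChar x := by
      by_cases hg : x = '-'
      · subst hg; simp [pvMarkChar]; decide
      · simp [pvMarkChar, hg, h0]
    rw [hx, ih (s + 1) (fun k h1 h2 => h k (by omega)
        (by push_cast [List.length_cons] at h2 ⊢; omega))]
    rfl

lemma pvSegUpper (ps pe : Int) (xs : List Char) (s : Int)
    (h : ∀ k : Int, s ≤ k → k < s + xs.length → ps ≤ k ∧ k < pe) :
    (PySem.List.enumerate xs s).map (pvMarkChar ps pe) = PySem.Chars.upper xs := by
  induction xs generalizing s with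
  | nil => simp [PySem.List.enumerate_nil, PySem.Chars.upper]
  | cons x xs ih =>
    rw [PySem.List.enumerate_cons, List.map_cons]
    have h0 : ps ≤ s ∧ s < pe := h s le_rfl (by push_cast [List.length_cons]; omega)
    have hx : pvMarkChar ps pe (s, x) = PySem.Chars.upperChar x := by
      by_cases hgx : x = '-'
      · subst hgx; simp [pvMarkChar]; decide
      · simp [pvMarkChar, hgx, h0]
    rw [hx, ih (s + 1) (fun k h1 h2 => h k (by omega)
        (by push_cast [List.length_cons] at h2 ⊢; omega))]
    rfl

-- Core: A's marked list equals B's three-segment concatenation, for any chars.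
lemma pvCore (cs : List Char) (s0 plen : Int) :
    (PySem.List.enumerate cs 0).map
        (pvMarkChar (max 0 s0) (min (cs.length : Int) (s0 + plen)))
      = PySem.Chars.lower (cs.take ((min (cs.length : Int) (max 0 s0)).toNat))
        ++ (PySem.Chars.upper ((cs.drop ((min (cs.length : Int) (max 0 s0)).toNat)).take
              ((max ((min (cs.length : Int) (max 0 s0)).toNat) ((min (cs.length : Int) (s0 + plen)).toNat))
                - (min (cs.length : Int) (max 0 s0)).toNat))
        ++ PySem.Chars.lower (cs.drop
              ((max ((min (cs.length : Int) (max 0 s0)).toNat) ((min (cs.length : Int) (s0 + plen)).toNat))))) := by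
  set ps : Int := max 0 s0 with hps
  set pe : Int := min (cs.length : Int) (s0 + plen) with hpe
  set st : Nat := (min (cs.length : Int) ps).toNat with hst
  set en : Nat := max st pe.toNat with hen
  have hstle : st ≤ cs.length := by omega
  have henle : en ≤ cs.length := by omega
  have hsten : st ≤ en := by omega
  have hdecomp : cs = cs.take st ++ ((cs.drop st).take (en - st) ++ cs.drop en) := by
    have h1 : (cs.drop st).take (en - st) ++ (cs.drop st).drop (en - st) = cs.drop st :=
      List.take_append_drop _ _
    have h2 : (cs.drop st).drop (en - st) = cs.drop en := by
      rw [List.drop_drop]; congr 1; omega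
    rw [h2] at h1
    rw [h1, List.take_append_drop]
  have hl1 : (cs.take st).length = st := by simp [hstle]
  have hl2 : ((cs.drop st).take (en - st)).length = en - st := by
    simp [List.length_drop]; omega
  conv_lhs => rw [hdecomp]
  rw [PySem.List.enumerate_append, PySem.List.enumerate_append, List.map_append, List.map_append,
      hl1, hl2]
  congr 1
  · apply pvSegLower
    intro k hk1 hk2
    rw [hl1] at hk2
    omega
  congr 1
  · apply pvSegUpper
    intro k hk1 hk2
    push_cast at hk1 hk2
    constructor <;> omega
  · apply pvSegLower
    intro k hk1 hk2
    rw [List.length_drop] at hk2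
    push_cast at hk1 hk2
    omega

-- On an all-gap list A's per-character map is just lowercase.
lemma pvAllGaps (ps pe : Int) (xs : List Char) (s : Int) (h : ∀ c ∈ xs, c = '-') :
    (PySem.List.enumerate xs s).map (pvMarkChar ps pe) = PySem.Chars.lower xs := by
  induction xs generalizing s with
  | nil => simp [PySem.List.enumerate_nil, PySem.Chars.lower]
  | cons x xs ih =>
    rw [PySem.List.enumerate_cons, List.map_cons]
    have hx : x = '-' := h x List.mem_cons_self
    subst hx
    have hm : pvMarkChar ps pe (s, '-') = PySem.Chars.lowerChar '-' := by
      simp [pvMarkChar]; decide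
    rw [hm, ih (s + 1) (fun c hc => h c (List.mem_cons_of_mem _ hc))]
    rfl

lemma pvStrLower (s : String) :
    PySem.Str.lower s = String.ofList (PySem.Chars.lower s.toList) := by
  simp [PySem.Str.lower]

-- ===== VERDICT (by name: the statement is the Claim_ definition above) =====
theorem mark_promoter_regions_spec : Claim_equal_mark_promoter_regions := by
  intro aligned_seq anchor_data promoter_shift promoter_length alignment_offset _
  unfold Spec_mark_promoter_regions mark_promoter_regions mark_promoter_regions_alt
  match anchor_data with
  | none => rfl
  | some (pos, kmer) =>
    simp only
    set cs := aligned_seq.toList with hcs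
    by_cases hg : List.replicate cs.length '-' = cs
    · rw [if_pos hg, pvStrLower]
      congr 1
      have hc := pvCore cs (pos + alignment_offset - promoter_shift) promoter_length
      rw [pvAllGaps _ _ cs 0 (fun c hmem => by
            rw [← hg] at hmem; exact List.eq_of_mem_replicate hmem)] at hc
      exact hc.trans (List.append_assoc _ _ _).symm
    · rw [if_neg hg]
      congr 1
      exact (pvCore cs (pos + alignment_offset - promoter_shift) promoter_length).trans
        (List.append_assoc _ _ _).symm
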